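-- pv_equiv track=rewrite | github.com/0Zhansultan/cryptographie | finale1.py | filtre_list
-- ===== SOURCE A (Python) =====
-- def filtre_list(lists, sequence):
--     def contains_sequence(lst, sequence):
--         for i in range(len(lst) - len(sequence) + 1):
--             if lst[i:i+len(sequence)] == sequence:
--                 return True
--         return False
--
--     filtered_lists = [lst for lst in lists if contains_sequence(lst, sequence)]
--     return filtered_lists
-- ===== SOURCE B (Python) =====
-- def filtre_list(lists, sequence):
--     # Pattern-major search: keep the set of candidate start positions and
--     # narrow it one pattern element at a time (no slices are built).
--     def contains(lst):
--         candidates = list(range(len(lst) - len(sequence) + 1))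
--         j = 0
--         for c in sequence:
--             candidates = [i for i in candidates if lst[i + j] == c]
--             j += 1
--             if not candidates:
--                 break
--         return bool(candidates)
--
--     return [lst for lst in lists if contains(lst)]
-- ===== Notes on version B (the rewrite author's own statement) =====
-- stated objective: alternative
-- what changed: A scans each list text-major, building a fresh slice lst[i:i+m] at every start position and comparing it to the sequence; B searches pattern-major: it keeps the list of candidate start positions and narrows it one sequence element at a time (with early exit when no candidate survives), building no slices.
import Mathlib
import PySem

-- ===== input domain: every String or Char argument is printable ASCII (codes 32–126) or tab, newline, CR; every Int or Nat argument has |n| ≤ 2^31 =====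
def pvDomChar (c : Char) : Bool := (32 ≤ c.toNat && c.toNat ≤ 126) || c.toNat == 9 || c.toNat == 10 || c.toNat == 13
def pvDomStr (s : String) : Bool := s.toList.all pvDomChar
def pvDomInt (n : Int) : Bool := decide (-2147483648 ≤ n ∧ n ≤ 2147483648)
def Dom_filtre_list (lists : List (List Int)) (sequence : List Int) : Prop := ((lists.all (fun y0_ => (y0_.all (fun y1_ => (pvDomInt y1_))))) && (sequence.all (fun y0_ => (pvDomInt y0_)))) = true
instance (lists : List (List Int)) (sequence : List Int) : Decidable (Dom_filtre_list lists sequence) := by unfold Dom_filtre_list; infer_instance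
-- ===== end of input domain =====

-- B replaces A's slice-per-position scan by a pattern-major candidate filter: the set of
-- start positions is narrowed one pattern element at a time (alternative algorithm, no slices).


-- ===== PORT A =====
-- inner def contains_sequence: for i in range(len(lst)-len(sequence)+1): if lst[i:i+len(sequence)] == sequence: return True
def containsSequence (lst : List Int) (sequence : List Int) : Bool :=
  (PySem.List.pyRange 0 ((lst.length : Int) - (sequence.length : Int) + 1) 1).any
    (fun i => PySem.List.slice lst (some i) (some (i + (sequence.length : Int))) == sequence)

def filtre_list (lists : List (List Int)) (sequence : List Int) : List (List Int) :=
  lists.filter (fun lst => containsSequence lst sequence)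

-- ===== PORT B =====
-- the 'for c in sequence' loop of B's contains, carrying (candidates, j); break when empty
def altLoop (lst : List Int) : List Int → Int → List Int → List Int
  | cands, _, [] => cands
  | cands, j, c :: rest =>
    let cands' := cands.filter (fun i => PySem.List.pyGet? lst (i + j) == some c)
    if cands'.isEmpty then cands' else altLoop lst cands' (j + 1) rest

def altContains (lst : List Int) (sequence : List Int) : Bool :=
  -- candidates = list(range(len(lst)-len(sequence)+1)); the loop; return bool(candidates)
  !(altLoop lst (PySem.List.pyRange 0 ((lst.length : Int) - (sequence.length : Int) + 1) 1) 0 sequence).isEmpty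

def filtre_list_alt (lists : List (List Int)) (sequence : List Int) : List (List Int) :=
  lists.filter (fun lst => altContains lst sequence)

-- ===== PRECONDITION & SPEC =====
def Spec_filtre_list (lists : List (List Int)) (sequence : List Int) (out : List (List Int)) : Prop := out = filtre_list_alt lists sequence
instance (lists : List (List Int)) (sequence : List Int) (out : List (List Int)) : Decidable (Spec_filtre_list lists sequence out) := by unfold Spec_filtre_list; infer_instance

-- ===== CLAIM (what is proved, stated in full; the proofs are below) =====
def Claim_equal_filtre_list : Prop := ∀ (lists : List (List Int)) (sequence : List Int), Dom_filtre_list lists sequence → Spec_filtre_list lists sequence (filtre_list lists sequence)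

-- ===== LEMMAS AND PROOFS =====

-- "the pattern matches lst starting at absolute index k"
def pvMatch (lst : List Int) : Int → List Int → Bool
  | _, [] => true
  | k, c :: r => (PySem.List.pyGet? lst k == some c) && pvMatch lst (k + 1) r

theorem altLoop_eq_filter (lst : List Int) (rest : List Int) :
    ∀ (cands : List Int) (j : Int),
      altLoop lst cands j rest = cands.filter (fun i => pvMatch lst (i + j) rest) := by
  induction rest with
  | nil => intro cands j; simp [altLoop, pvMatch]
  | cons c r ih =>
    intro cands j
    simp only [altLoop]
    by_cases h : (cands.filter (fun i => PySem.List.pyGet? lst (i + j) == some c)).isEmpty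
    · simp only [h, if_true]
      rw [List.isEmpty_iff] at h
      have : cands.filter (fun i => pvMatch lst (i + j) (c :: r)) = [] := by
        rw [List.filter_eq_nil_iff] at h ⊢
        intro a ha
        have := h a ha
        simp [pvMatch] at this ⊢
        intro hget
        exact absurd hget this
      rw [this, h]
    · simp only [h]
      rw [ih]
      rw [List.filter_filter]
      apply List.filter_congr
      intro a _
      simp only [pvMatch]
      rw [show a + (j + 1) = a + j + 1 by ring]
      exact Bool.and_comm _ _

theorem slice_eq_iff_pvMatch (seq : List Int) :
    ∀ (a : Nat) (lst : List Int),
      ((lst.drop a).take seq.length = seq) ↔ pvMatch lst (a : Int) seq = true := by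
  induction seq with
  | nil => intro a lst; simp [pvMatch]
  | cons c r ih =>
    intro a lst
    cases h : lst[a]? with
    | none =>
      have hlen : lst.length ≤ a := by
        rwa [List.getElem?_eq_none_iff] at h
      have hd : lst.drop a = [] := List.drop_eq_nil_of_le hlen
      simp [hd, pvMatch, PySem.List.pyGet?_natCast, h]
    | some x =>
      have hlt : a < lst.length := by
        by_contra hb
        rw [List.getElem?_eq_none_iff.mpr (by omega)] at h; exact absurd h (by simp)
      have hd : lst.drop a = lst[a] :: lst.drop (a + 1) := List.drop_eq_getElem_cons hlt
      have hx : lst[a] = x := by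
        have := h; rwa [List.getElem?_eq_getElem hlt, Option.some_inj] at this
      have hcast : (a : Int) + 1 = ((a + 1 : Nat) : Int) := by push_cast; ring
      rw [hd, hx]
      simp only [List.length_cons, List.take_succ_cons, List.cons.injEq, pvMatch,
        Bool.and_eq_true, beq_iff_eq, PySem.List.pyGet?_natCast, h, Option.some.injEq, hcast]
      exact and_congr Iff.rfl (ih (a + 1) lst)

theorem any_eq_not_isEmpty_filter (l : List Int) (p : Int → Bool) :
    l.any p = !(l.filter p).isEmpty := by
  induction l with
  | nil => rfl
  | cons a t ih => by_cases h : p a <;> simp [List.any_cons, h, ih]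

theorem contains_eq (lst : List Int) (seq : List Int) :
    containsSequence lst seq = altContains lst seq := by
  simp only [containsSequence, altContains]
  rw [altLoop_eq_filter, any_eq_not_isEmpty_filter]
  have hpt : ∀ i ∈ PySem.List.pyRange 0 ((lst.length : Int) - (seq.length : Int) + 1) 1,
      (PySem.List.slice lst (some i) (some (i + (seq.length : Int))) == seq)
        = pvMatch lst (i + 0) seq := by
    intro i hi
    have h0 : 0 ≤ i := (PySem.List.mem_pyRange_one.mp hi).1
    obtain ⟨a, rfl⟩ : ∃ a : Nat, i = (a : Int) := ⟨i.toNat, by omega⟩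
    rw [Int.add_zero,
      show ((a : Int) + (seq.length : Int)) = ((a : Int) + ((seq.length : Nat) : Int)) from rfl,
      PySem.List.slice_natCast_add, Bool.eq_iff_iff, beq_iff_eq]
    exact (slice_eq_iff_pvMatch seq a lst).trans (by simp)
  rw [List.filter_congr hpt]

-- ===== VERDICT (by name: the statement is the Claim_ definition above) =====
theorem filtre_list_spec : Claim_equal_filtre_list := by
  intro lists sequence _
  unfold Spec_filtre_list filtre_list filtre_list_alt
  apply List.filter_congr
  intro lst _
  exact contains_eq lst sequence
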